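-- pv_equiv track=rewrite | github.com/mosabsayyed/beauty | backend/app/services/tier1_assembler.py | _sort_tier1_elements
-- ===== SOURCE A (Python) =====
-- from typing import Dict, List
--
-- def _sort_tier1_elements(elements: List[Dict]) -> List[Dict]:
--     """
--     Reorder Tier 1 elements: context/rules/identity BEFORE instructions/format.
--
--     CRITICAL: Front-load all foundational context, rules, and identity BEFORE procedural instructions.
--     This ensures the LLM understands the "why" and "what you must know" before the "how".
--
--     Step 0 order (Classification & Routing):
--       1. remember (bootstrap context) → 0.0_step0_remember
--       2. mindset_all_modes (identity anchor) → 0.6_step0_mindset_all_modes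
--       3. memory_access_rules (constraints) → 0.3_step0_memory_access_rules
--       4. dedup_rule & forbidden (rules) → 0.4_*, 0.5_*
--       5. mode_classification, conditional_routing (instructions) → 0.1_*, 0.2_*
--
--     Step 5 order (Response Format):
--       1. rules_of_thumb (foundational rules) → 5.5_step5_rules_of_thumb
--       2. synthesis_mandate, business_translation (context) → 5.0_0_*, 5.1_*
--       3. respond, return, workflow_steps (instructions) → 5.0_*, 5.0_1_*
--       4. output_format, evidence_gating, visualization (format) → 5.2_*, 5.3_*, 5.4_*
--     """
--     def name(elem: Dict) -> str:
--         return (elem.get("element") or "").lower()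
--
--     step0 = [e for e in elements if name(e).startswith("0.")]
--     step5 = [e for e in elements if name(e).startswith("5.")]
--     others = [e for e in elements if e not in step0 and e not in step5]
--
--     def rank_step0(n: str) -> tuple:
--         """Rank Step 0: remember → mindset → rules → instructions."""
--         # 1. Bootstrap context (remember)
--         if "remember" in n:
--             return (1, n)
--         # 2. Identity/Mindset
--         if "mindset" in n:
--             return (2, n)
--         # 3. Rules (memory access, dedup, forbidden)
--         if any(k in n for k in ["memory_access", "dedup", "forbidden"]):
--             return (3, n)
--         # 4. Instructions (mode_classification, routing, conditional)
--         return (4, n)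
--
--     def rank_step5(n: str) -> tuple:
--         """Rank Step 5: rules → synthesis/context → response → format."""
--         # 1. Foundational rules
--         if "rules_of_thumb" in n or ("thumb" in n and "rules" in n):
--             return (1, n)
--         # 2. Context/Synthesis (synthesis_mandate, business_translation)
--         if any(k in n for k in ["synthesis", "business_translation"]):
--             return (2, n)
--         # 3. Response instructions (respond, return, workflow_steps)
--         if any(k in n for k in ["respond", "return", "workflow"]):
--             return (3, n)
--         # 4. Format/Evidence (output_format, evidence_gating, visualization)
--         if any(k in n for k in ["output_format", "evidence", "visualization"]):
--             return (4, n)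
--         # Default: late in sequence
--         return (5, n)
--
--     step0_sorted = sorted(step0, key=lambda e: rank_step0(name(e)))
--     step5_sorted = sorted(step5, key=lambda e: rank_step5(name(e)))
--
--     return step0_sorted + step5_sorted + others
-- ===== SOURCE B (Python) =====
-- from typing import Dict, List
--
-- def _sort_tier1_elements(elements: List[Dict]) -> List[Dict]:
--     """Single stable sort of the whole list under one composite (group-rank, name) key."""
--
--     def _rank_step0(n: str) -> int:
--         if "remember" in n:
--             return 1
--         if "mindset" in n:
--             return 2
--         if any(k in n for k in ["memory_access", "dedup", "forbidden"]):
--             return 3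
--         return 4
--
--     def _rank_step5(n: str) -> int:
--         if "rules_of_thumb" in n or ("thumb" in n and "rules" in n):
--             return 1
--         if any(k in n for k in ["synthesis", "business_translation"]):
--             return 2
--         if any(k in n for k in ["respond", "return", "workflow"]):
--             return 3
--         if any(k in n for k in ["output_format", "evidence", "visualization"]):
--             return 4
--         return 5
--
--     def _key(e: Dict) -> tuple:
--         n = (e.get("element") or "").lower()
--         if n.startswith("0."):
--             return (_rank_step0(n), n)          # group 0: ranks 1..4
--         if n.startswith("5."):
--             return (10 + _rank_step5(n), n)     # group 5: ranks 11..15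
--         return (20, "")                         # others: constant key, stability keeps order
--
--     return sorted(elements, key=_key)
-- ===== Notes on version B (the rewrite author's own statement) =====
-- stated objective: simpler
-- what changed: Replaces A's three filtering passes (with their 'e not in step0/step5' bucket membership rescans), two per-bucket sorts and a concatenation by one stable sort of the whole list under a single composite (group-rank, name) key.
import Mathlib
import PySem

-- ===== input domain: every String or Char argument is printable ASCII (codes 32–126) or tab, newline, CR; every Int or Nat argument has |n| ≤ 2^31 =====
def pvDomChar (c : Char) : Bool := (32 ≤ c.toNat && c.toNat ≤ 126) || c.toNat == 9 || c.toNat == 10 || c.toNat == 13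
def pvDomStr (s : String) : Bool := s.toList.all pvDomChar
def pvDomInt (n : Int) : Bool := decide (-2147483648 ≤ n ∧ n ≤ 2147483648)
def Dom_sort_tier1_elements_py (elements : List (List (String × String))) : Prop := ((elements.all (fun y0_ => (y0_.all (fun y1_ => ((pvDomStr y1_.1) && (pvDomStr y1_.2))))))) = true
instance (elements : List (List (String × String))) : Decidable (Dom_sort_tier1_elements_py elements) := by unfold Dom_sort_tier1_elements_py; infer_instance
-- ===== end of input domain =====

-- B replaces A's three partition passes (with their list-membership scans), two per-bucket
-- sorts and concatenation by ONE stable sort of the whole list under a composite key.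

-- ===== PORT A =====
def pvNameA (e : List (String × String)) : String :=
  PySem.Str.lower ((PySem.Dict.get? (PySem.Dict.mk e) "element").getD "")

def pvRank0A (n : String) : Int :=
  if PySem.Str.isIn "remember" n then 1
  else if PySem.Str.isIn "mindset" n then 2
  else if ["memory_access", "dedup", "forbidden"].any (fun k => PySem.Str.isIn k n) then 3
  else 4

def pvRank5A (n : String) : Int :=
  if PySem.Str.isIn "rules_of_thumb" n || (PySem.Str.isIn "thumb" n && PySem.Str.isIn "rules" n) then 1
  else if ["synthesis", "business_translation"].any (fun k => PySem.Str.isIn k n) then 2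
  else if ["respond", "return", "workflow"].any (fun k => PySem.Str.isIn k n) then 3
  else if ["output_format", "evidence", "visualization"].any (fun k => PySem.Str.isIn k n) then 4
  else 5

def sort_tier1_elements_py (elements : List (List (String × String))) : List (List (String × String)) :=
  let step0 := elements.filter (fun e => PySem.Str.startswith (pvNameA e) "0.")
  let step5 := elements.filter (fun e => PySem.Str.startswith (pvNameA e) "5.")
  let others := elements.filter (fun e => !(step0.contains e) && !(step5.contains e))
  let step0_sorted := PySem.List.sorted2 step0 (fun e => pvRank0A (pvNameA e)) (fun e => pvNameA e)
  let step5_sorted := PySem.List.sorted2 step5 (fun e => pvRank5A (pvNameA e)) (fun e => pvNameA e)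
  step0_sorted ++ step5_sorted ++ others

-- ===== PORT B =====
def pvRank0B (n : String) : Int :=
  if PySem.Str.isIn "remember" n then 1
  else if PySem.Str.isIn "mindset" n then 2
  else if ["memory_access", "dedup", "forbidden"].any (fun k => PySem.Str.isIn k n) then 3
  else 4

def pvRank5B (n : String) : Int :=
  if PySem.Str.isIn "rules_of_thumb" n || (PySem.Str.isIn "thumb" n && PySem.Str.isIn "rules" n) then 1
  else if ["synthesis", "business_translation"].any (fun k => PySem.Str.isIn k n) then 2
  else if ["respond", "return", "workflow"].any (fun k => PySem.Str.isIn k n) then 3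
  else if ["output_format", "evidence", "visualization"].any (fun k => PySem.Str.isIn k n) then 4
  else 5

def pvKeyB (e : List (String × String)) : Int × String :=
  let n := PySem.Str.lower ((PySem.Dict.get? (PySem.Dict.mk e) "element").getD "")
  if PySem.Str.startswith n "0." then (pvRank0B n, n)
  else if PySem.Str.startswith n "5." then (10 + pvRank5B n, n)
  else (20, "")

def sort_tier1_elements_py_alt (elements : List (List (String × String))) : List (List (String × String)) :=
  PySem.List.sorted2 elements (fun e => (pvKeyB e).1) (fun e => (pvKeyB e).2)

-- ===== PRECONDITION & SPEC =====
def Spec_sort_tier1_elements_py (elements : List (List (String × String))) (out : List (List (String × String))) : Prop := out = sort_tier1_elements_py_alt elements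
instance (elements : List (List (String × String))) (out : List (List (String × String))) : Decidable (Spec_sort_tier1_elements_py elements out) := by unfold Spec_sort_tier1_elements_py; infer_instance

-- ===== CLAIM (what is proved, stated in full; the proofs are below) =====
def Claim_equal_sort_tier1_elements_py : Prop := ∀ (elements : List (List (String × String))), Dom_sort_tier1_elements_py elements → Spec_sort_tier1_elements_py elements (sort_tier1_elements_py elements)

-- ===== LEMMAS AND PROOFS =====

-- insertBy respects a pointwise-equal comparison
theorem pvInsertBy_congr {α : Type} (b1 b2 : α → α → Bool) (x : α) (ys : List α)
    (h : ∀ y ∈ ys, b1 x y = b2 x y) :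
    PySem.List.insertBy b1 x ys = PySem.List.insertBy b2 x ys := by
  induction ys with
  | nil => rfl
  | cons y t ih =>
    simp only [PySem.List.insertBy, h y List.mem_cons_self]
    split
    · rfl
    · exact congrArg (y :: ·) (ih fun z hz => h z (List.mem_cons_of_mem y hz))

-- x walks past a block it never goes before
theorem pvInsertBy_skip {α : Type} (before : α → α → Bool) (x : α) (L R : List α)
    (h : ∀ y ∈ L, before x y = false) :
    PySem.List.insertBy before x (L ++ R) = L ++ PySem.List.insertBy before x R := by
  induction L with
  | nil => rfl
  | cons y t ih =>
    simp only [List.cons_append, PySem.List.insertBy, h y List.mem_cons_self]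
    simp only [Bool.false_eq_true, if_false]
    exact congrArg (y :: ·) (ih fun z hz => h z (List.mem_cons_of_mem y hz))

-- x stops no later than a block it always goes before
theorem pvInsertBy_stop {α : Type} (before : α → α → Bool) (x : α) (L R : List α)
    (h : ∀ y ∈ R, before x y = true) :
    PySem.List.insertBy before x (L ++ R) = PySem.List.insertBy before x L ++ R := by
  induction L with
  | nil =>
    cases R with
    | nil => rfl
    | cons r t => simp [PySem.List.insertBy, h r List.mem_cons_self]
  | cons y t ih =>
    simp only [List.cons_append, PySem.List.insertBy]
    split
    · rfl
    · exact congrArg (y :: ·) ih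

-- the insertion-sort fold splits along a predicate whose two classes are totally separated
theorem pvFoldl_split {α : Type} (p : α → Bool) (before : α → α → Bool)
    (H1 : ∀ a b, p a = true → p b = false → before a b = true)
    (H2 : ∀ a b, p a = false → p b = true → before a b = false)
    (xs : List α) : ∀ (L R : List α), (∀ y ∈ L, p y = true) → (∀ y ∈ R, p y = false) →
    xs.foldl (fun acc x => PySem.List.insertBy before x acc) (L ++ R) =
      (xs.filter p).foldl (fun acc x => PySem.List.insertBy before x acc) L ++
      (xs.filter (fun x => !p x)).foldl (fun acc x => PySem.List.insertBy before x acc) R := by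
  induction xs with
  | nil => intro L R _ _; rfl
  | cons x t ih =>
    intro L R hL hR
    by_cases hx : p x = true
    · have hstep : PySem.List.insertBy before x (L ++ R) = PySem.List.insertBy before x L ++ R :=
        pvInsertBy_stop before x L R (fun y hy => H1 x y hx (hR y hy))
      simp only [List.foldl_cons, hstep, List.filter_cons, hx, Bool.not_true, if_true]
      simp only [Bool.false_eq_true, if_false]
      exact ih (PySem.List.insertBy before x L) R
        (fun y hy => by
          rcases (PySem.List.mem_insertBy before x y _).mp hy with h | h
          · exact h ▸ hx
          · exact hL y h)
        hR
    · have hx' : p x = false := by revert hx; cases p x <;> simp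
      have hstep : PySem.List.insertBy before x (L ++ R) = L ++ PySem.List.insertBy before x R :=
        pvInsertBy_skip before x L R (fun y hy => H2 x y hx' (hL y hy))
      simp only [List.foldl_cons, hstep, List.filter_cons, hx', Bool.not_false]
      simp only [Bool.false_eq_true, if_false, if_true]
      exact ih L (PySem.List.insertBy before x R) hL
        (fun y hy => by
          rcases (PySem.List.mem_insertBy before x y _).mp hy with h | h
          · exact h ▸ hx'
          · exact hR y h)

-- on a class inside which the comparison is constantly false, insertion sort is the identity
theorem pvFoldl_flat {α : Type} (p : α → Bool) (before : α → α → Bool)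
    (H : ∀ a b, p a = true → p b = true → before a b = false)
    (xs : List α) : ∀ (init : List α), (∀ y ∈ init, p y = true) → (∀ x ∈ xs, p x = true) →
    xs.foldl (fun acc x => PySem.List.insertBy before x acc) init = init ++ xs := by
  induction xs with
  | nil => intro init _ _; simp
  | cons x t ih =>
    intro init hinit hxs
    have hx := hxs x List.mem_cons_self
    have hstep : PySem.List.insertBy before x init = init ++ [x] :=
      PySem.List.insertBy_of_forall_not_before before x init
        (fun y hy => H x y hx (hinit y hy))
    simp only [List.foldl_cons, hstep]
    rw [ih (init ++ [x])
      (fun y hy => by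
        rcases List.mem_append.mp hy with h | h
        · exact hinit y h
        · simpa using (List.mem_singleton.mp h) ▸ hx)
      (fun y hy => hxs y (List.mem_cons_of_mem x hy))]
    simp

-- two comparisons agreeing on a class sort that class identically
theorem pvFoldl_congr {α : Type} (p : α → Bool) (b1 b2 : α → α → Bool)
    (H : ∀ a b, p a = true → p b = true → b1 a b = b2 a b)
    (xs : List α) : ∀ (init : List α), (∀ y ∈ init, p y = true) → (∀ x ∈ xs, p x = true) →
    xs.foldl (fun acc x => PySem.List.insertBy b1 x acc) init =
      xs.foldl (fun acc x => PySem.List.insertBy b2 x acc) init := by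
  induction xs with
  | nil => intro init _ _; rfl
  | cons x t ih =>
    intro init hinit hxs
    have hx := hxs x List.mem_cons_self
    have hstep : PySem.List.insertBy b1 x init = PySem.List.insertBy b2 x init :=
      pvInsertBy_congr b1 b2 x init (fun y hy => H x y hx (hinit y hy))
    simp only [List.foldl_cons, hstep]
    exact ih (PySem.List.insertBy b2 x init)
      (fun y hy => by
        rcases (PySem.List.mem_insertBy b2 x y _).mp hy with h | h
        · exact h ▸ hx
        · exact hinit y h)
      (fun y hy => hxs y (List.mem_cons_of_mem x hy))

-- rank bounds
theorem pvRank0B_bounds (n : String) : 1 ≤ pvRank0B n ∧ pvRank0B n ≤ 4 := by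
  unfold pvRank0B; split_ifs <;> omega

theorem pvRank5B_bounds (n : String) : 1 ≤ pvRank5B n ∧ pvRank5B n ≤ 5 := by
  unfold pvRank5B; split_ifs <;> omega

-- a name cannot start with both "0." and "5."
theorem pvStarts_disjoint (n : String) :
    PySem.Str.startswith n "0." = true → PySem.Str.startswith n "5." = false := by
  intro h0
  by_contra h5
  have h5' : PySem.Str.startswith n "5." = true := by revert h5; cases PySem.Str.startswith n "5." <;> simp
  have p0 : ('0' :: '.' :: []) <+: n.toList := by
    have := PySem.Chars.startswith_iff (s := n.toList) (p := "0.".toList)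
    simpa [PySem.Str.startswith] using this.mp (by simpa [PySem.Str.startswith] using h0)
  have p5 : ('5' :: '.' :: []) <+: n.toList := by
    have := PySem.Chars.startswith_iff (s := n.toList) (p := "5.".toList)
    simpa [PySem.Str.startswith] using this.mp (by simpa [PySem.Str.startswith] using h5')
  rcases p0 with ⟨t0, e0⟩
  rcases p5 with ⟨t5, e5⟩
  rw [← e0] at e5
  simp at e5

-- key facts per class
theorem pvKeyB_p0 (e : List (String × String)) (h : PySem.Str.startswith (pvNameA e) "0." = true) :
    pvKeyB e = (pvRank0B (pvNameA e), pvNameA e) := by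
  unfold pvKeyB pvNameA at *
  simp only [h, if_true]

theorem pvKeyB_p5 (e : List (String × String)) (h : PySem.Str.startswith (pvNameA e) "5." = true) :
    pvKeyB e = (10 + pvRank5B (pvNameA e), pvNameA e) := by
  unfold pvKeyB pvNameA at *
  have h0 : PySem.Str.startswith (PySem.Str.lower ((PySem.Dict.get? (PySem.Dict.mk e) "element").getD "")) "0." = false := by
    by_contra hc
    have : PySem.Str.startswith (PySem.Str.lower ((PySem.Dict.get? (PySem.Dict.mk e) "element").getD "")) "0." = true := by
      revert hc; cases PySem.Str.startswith (PySem.Str.lower ((PySem.Dict.get? (PySem.Dict.mk e) "element").getD "")) "0." <;> simp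
    rw [pvStarts_disjoint _ this] at h
    exact Bool.false_ne_true h
  simp only [h0, h, Bool.false_eq_true, if_false, if_true]

theorem pvKeyB_other (e : List (String × String))
    (h0 : PySem.Str.startswith (pvNameA e) "0." = false)
    (h5 : PySem.Str.startswith (pvNameA e) "5." = false) :
    pvKeyB e = (20, "") := by
  unfold pvKeyB pvNameA at *
  simp only [h0, h5, Bool.false_eq_true, if_false]

-- proof-side abbreviations for the predicates and comparators
def pvP0 (e : List (String × String)) : Bool := PySem.Str.startswith (pvNameA e) "0."
def pvP5 (e : List (String × String)) : Bool := PySem.Str.startswith (pvNameA e) "5."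
def pvP05 (e : List (String × String)) : Bool := pvP0 e || pvP5 e

def pvBB (a b : List (String × String)) : Bool :=
  decide ((pvKeyB a).1 < (pvKeyB b).1) ||
    (!decide ((pvKeyB b).1 < (pvKeyB a).1) && decide ((pvKeyB a).2 < (pvKeyB b).2))

def pvBA0 (a b : List (String × String)) : Bool :=
  decide (pvRank0A (pvNameA a) < pvRank0A (pvNameA b)) ||
    (!decide (pvRank0A (pvNameA b) < pvRank0A (pvNameA a)) && decide (pvNameA a < pvNameA b))

def pvBA5 (a b : List (String × String)) : Bool :=
  decide (pvRank5A (pvNameA a) < pvRank5A (pvNameA b)) ||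
    (!decide (pvRank5A (pvNameA b) < pvRank5A (pvNameA a)) && decide (pvNameA a < pvNameA b))

-- composite-key bounds per class
theorem pvK1_p0 (e : List (String × String)) (h : pvP0 e = true) :
    1 ≤ (pvKeyB e).1 ∧ (pvKeyB e).1 ≤ 4 := by
  rw [pvKeyB_p0 e h]
  exact pvRank0B_bounds (pvNameA e)

theorem pvK1_p5 (e : List (String × String)) (h : pvP5 e = true) :
    11 ≤ (pvKeyB e).1 ∧ (pvKeyB e).1 ≤ 15 := by
  rw [pvKeyB_p5 e h]
  have := pvRank5B_bounds (pvNameA e)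
  constructor <;> [omega; omega]

theorem pvK_other (e : List (String × String)) (h : pvP05 e = false) :
    pvKeyB e = (20, "") := by
  have h' := h
  unfold pvP05 pvP0 pvP5 at h'
  rcases Bool.or_eq_false_iff.mp h' with ⟨h0, h5⟩
  exact pvKeyB_other e h0 h5

-- the three separation facts the split lemma needs
theorem pvSep05_lt (a b : List (String × String)) (ha : pvP05 a = true) (hb : pvP05 b = false) :
    pvBB a b = true := by
  have hb' := pvK_other b hb
  have hlt : (pvKeyB a).1 < (pvKeyB b).1 := by
    rcases Bool.or_eq_true_iff.mp ha with h | h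
    · have := pvK1_p0 a h; rw [hb']; omega
    · have := pvK1_p5 a h; rw [hb']; omega
  simp [pvBB, hlt]

theorem pvSep05_ge (a b : List (String × String)) (ha : pvP05 a = false) (hb : pvP05 b = true) :
    pvBB a b = false := by
  have ha' := pvK_other a ha
  have hlt : (pvKeyB b).1 < (pvKeyB a).1 := by
    rcases Bool.or_eq_true_iff.mp hb with h | h
    · have := pvK1_p0 b h; rw [ha']; omega
    · have := pvK1_p5 b h; rw [ha']; omega
  have h1 : ¬ ((pvKeyB a).1 < (pvKeyB b).1) := by omega
  simp [pvBB, h1, hlt]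

theorem pvSep0_lt (a b : List (String × String)) (ha : pvP0 a = true) (hb : pvP0 b = false) :
    pvBB a b = true := by
  have h1 := pvK1_p0 a ha
  have hlt : (pvKeyB a).1 < (pvKeyB b).1 := by
    by_cases h5 : pvP5 b = true
    · have := pvK1_p5 b h5; omega
    · have hb5 : pvP5 b = false := by revert h5; cases pvP5 b <;> simp
      have : pvKeyB b = (20, "") := by
        unfold pvP0 at hb; unfold pvP5 at hb5; exact pvKeyB_other b hb hb5
      rw [this]; omega
  simp [pvBB, hlt]

theorem pvSep0_ge (a b : List (String × String)) (ha : pvP0 a = false) (hb : pvP0 b = true) :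
    pvBB a b = false := by
  have h1 := pvK1_p0 b hb
  have hlt : (pvKeyB b).1 < (pvKeyB a).1 := by
    by_cases h5 : pvP5 a = true
    · have := pvK1_p5 a h5; omega
    · have ha5 : pvP5 a = false := by revert h5; cases pvP5 a <;> simp
      have : pvKeyB a = (20, "") := by
        unfold pvP0 at ha; unfold pvP5 at ha5; exact pvKeyB_other a ha ha5
      rw [this]; omega
  have h2 : ¬ ((pvKeyB a).1 < (pvKeyB b).1) := by omega
  simp [pvBB, h2, hlt]

-- within "others" the comparison is constantly false (constant key (20, ""))
theorem pvFlat_other (a b : List (String × String))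
    (ha : (!pvP05 a) = true) (hb : (!pvP05 b) = true) : pvBB a b = false := by
  have ha' := pvK_other a (by simpa using ha)
  have hb' := pvK_other b (by simpa using hb)
  simp [pvBB, ha', hb']

-- on each prefix class B's comparator coincides with A's per-bucket comparator
theorem pvCongr0 (a b : List (String × String)) (ha : pvP0 a = true) (hb : pvP0 b = true) :
    pvBB a b = pvBA0 a b := by
  unfold pvBB pvBA0
  rw [pvKeyB_p0 a ha, pvKeyB_p0 b hb]
  rfl

theorem pvCongr5 (a b : List (String × String)) (ha : pvP5 a = true) (hb : pvP5 b = true) :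
    pvBB a b = pvBA5 a b := by
  unfold pvBB pvBA5
  rw [pvKeyB_p5 a ha, pvKeyB_p5 b hb]
  have e1 : (10 + pvRank5B (pvNameA a) < 10 + pvRank5B (pvNameA b)) =
      (pvRank5A (pvNameA a) < pvRank5A (pvNameA b)) := by
    have : pvRank5A = pvRank5B := rfl
    rw [this]; simp only [eq_iff_iff]; omega
  have e2 : (10 + pvRank5B (pvNameA b) < 10 + pvRank5B (pvNameA a)) =
      (pvRank5A (pvNameA b) < pvRank5A (pvNameA a)) := by
    have : pvRank5A = pvRank5B := rfl
    rw [this]; simp only [eq_iff_iff]; omega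
  simp only [e1, e2]

-- A's "others" membership test is just the prefix test
theorem pvContains_filter (elements : List (List (String × String)))
    (p : List (String × String) → Bool) (e : List (String × String)) (he : e ∈ elements) :
    (elements.filter p).contains e = p e := by
  by_cases h : p e = true
  · rw [h]
    exact List.elem_eq_true_of_mem (List.mem_filter.mpr ⟨he, h⟩)
  · have h' : p e = false := by revert h; cases p e <;> simp
    rw [h']
    by_contra hc
    have : (elements.filter p).contains e = true := by
      revert hc; cases (elements.filter p).contains e <;> simp
    have hm := List.contains_iff_mem.mp this
    rw [(List.mem_filter.mp hm).2] at h'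
    simp at h'

theorem pvOthers_eq (elements : List (List (String × String))) :
    elements.filter (fun e =>
        !((elements.filter (fun e => PySem.Str.startswith (pvNameA e) "0.")).contains e) &&
        !((elements.filter (fun e => PySem.Str.startswith (pvNameA e) "5.")).contains e)) =
      elements.filter (fun e => !pvP05 e) := by
  apply List.filter_congr
  intro e he
  rw [pvContains_filter elements _ e he, pvContains_filter elements _ e he]
  show (!pvP0 e && !pvP5 e) = !pvP05 e
  unfold pvP05
  cases pvP0 e <;> cases pvP5 e <;> rfl

-- ===== assembly =====
theorem pvMain (elements : List (List (String × String))) :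
    sort_tier1_elements_py elements = sort_tier1_elements_py_alt elements := by
  have altEq : sort_tier1_elements_py_alt elements =
      elements.foldl (fun acc x => PySem.List.insertBy pvBB x acc) ([] ++ []) := rfl
  -- split whole-list sort into the 0./5. block and the constant-key tail
  have h1 := pvFoldl_split pvP05 pvBB pvSep05_lt pvSep05_ge elements [] []
    (by intro y hy; cases hy) (by intro y hy; cases hy)
  -- split the 0./5. block into the 0. bucket and the 5. bucket
  have h2 := pvFoldl_split pvP0 pvBB pvSep0_lt pvSep0_ge (elements.filter pvP05) [] []
    (by intro y hy; cases hy) (by intro y hy; cases hy)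
  -- the constant-key tail keeps its original order
  have h3 := pvFoldl_flat (fun e => !pvP05 e) pvBB pvFlat_other
    (elements.filter (fun x => !pvP05 x)) []
    (by intro y hy; cases hy)
    (by intro y hy; exact (List.mem_filter.mp hy).2)
  -- filter algebra
  have f0 : (elements.filter pvP05).filter pvP0 = elements.filter pvP0 := by
    rw [List.filter_filter]
    apply List.filter_congr
    intro e _
    unfold pvP05; cases pvP0 e <;> simp
  have f5 : (elements.filter pvP05).filter (fun x => !pvP0 x) = elements.filter pvP5 := by
    rw [List.filter_filter]
    apply List.filter_congr
    intro e _
    unfold pvP05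
    by_cases h0 : pvP0 e = true
    · have h5 : pvP5 e = false := pvStarts_disjoint (pvNameA e) h0
      simp [h0, h5]
    · have h0' : pvP0 e = false := by revert h0; cases pvP0 e <;> simp
      simp [h0']
  -- replace B's comparator by A's on each bucket
  have c0 := pvFoldl_congr pvP0 pvBB pvBA0 pvCongr0 (elements.filter pvP0) []
    (by intro y hy; cases hy) (by intro y hy; exact (List.mem_filter.mp hy).2)
  have c5 := pvFoldl_congr pvP5 pvBB pvBA5 pvCongr5 (elements.filter pvP5) []
    (by intro y hy; cases hy) (by intro y hy; exact (List.mem_filter.mp hy).2)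
  -- A, written as the same folds
  have aEq0 : sort_tier1_elements_py elements =
      (elements.filter pvP0).foldl (fun acc x => PySem.List.insertBy pvBA0 x acc) [] ++
      (elements.filter pvP5).foldl (fun acc x => PySem.List.insertBy pvBA5 x acc) [] ++
        elements.filter (fun e =>
          !((elements.filter (fun e => PySem.Str.startswith (pvNameA e) "0.")).contains e) &&
          !((elements.filter (fun e => PySem.Str.startswith (pvNameA e) "5.")).contains e)) := rfl
  have aEq := aEq0.trans (by rw [pvOthers_eq elements])
  simp only [List.nil_append] at h1 h2 h3 altEq
  rw [aEq, altEq, h1, h2, h3, f0, f5, c0, c5]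

-- ===== VERDICT (by name: the statement is the Claim_ definition above) =====
theorem sort_tier1_elements_py_spec : Claim_equal_sort_tier1_elements_py := by
  intro elements _
  unfold Spec_sort_tier1_elements_py
  exact pvMain elements
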